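-- pv_equiv track=rewrite | github.com/nishhc/CASPER | casper/set_generation/complex_features.py | _three_prime_self_run
-- ===== SOURCE A (Python) =====
-- def _three_prime_self_run(seq: str) -> int:
--     s = seq.replace("U", "T")
--     if not s:
--         return 0
--     last = s[-1]
--     run = 0
--     for ch in reversed(s):
--         if ch == last:
--             run += 1
--         else:
--             break
--     return run
-- ===== SOURCE B (Python) =====
-- from itertools import groupby
--
--
-- def _three_prime_self_run(seq: str) -> int:
--     s = seq.replace("U", "T")
--     if not s:
--         return 0
--     runs = [sum(1 for _ in grp) for _, grp in groupby(s)]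
--     return runs[-1]
-- ===== Notes on version B (the rewrite author's own statement) =====
-- stated objective: idiomatic
-- what changed: Replaces the backward scan with an early break by a single forward pass that builds all consecutive-character run lengths via itertools.groupby and returns the last one.
import Mathlib
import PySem

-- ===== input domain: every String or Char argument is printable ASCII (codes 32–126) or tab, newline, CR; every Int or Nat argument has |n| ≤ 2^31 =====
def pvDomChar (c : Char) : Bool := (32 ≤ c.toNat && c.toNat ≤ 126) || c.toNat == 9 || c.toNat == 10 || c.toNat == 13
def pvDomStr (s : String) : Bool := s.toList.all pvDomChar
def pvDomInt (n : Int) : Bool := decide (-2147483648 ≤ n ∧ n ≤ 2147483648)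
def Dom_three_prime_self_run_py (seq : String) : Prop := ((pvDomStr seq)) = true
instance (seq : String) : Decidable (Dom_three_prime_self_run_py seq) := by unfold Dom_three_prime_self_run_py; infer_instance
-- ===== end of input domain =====

-- B replaces A's backward scan with an early break by a single forward pass that
-- builds the consecutive-character run lengths (groupby) and returns the last one.

-- ===== PORT A =====
-- the 'for ch in reversed(s): if ch == last: run += 1 else: break' loop, with accumulator run
def pvRunA (last : Char) (run : Int) : List Char → Int
  | [] => run
  | ch :: t => if ch = last then pvRunA last (run + 1) t else run

def three_prime_self_run_py (seq : String) : Int :=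
  let s := (PySem.Str.replace seq "U" "T").toList
  if h : s = [] then 0
  else
    let last := s.getLast h      -- s[-1], defined since s ≠ []
    pvRunA last 0 s.reverse

-- ===== PORT B =====
-- itertools.groupby: forward pass producing the (char, run-length) groups in order
def pvRleGo (c : Char) (n : Int) : List Char → List (Char × Int)
  | [] => [(c, n)]
  | d :: t => if d = c then pvRleGo c (n + 1) t else (c, n) :: pvRleGo d 1 t

def three_prime_self_run_py_alt (seq : String) : Int :=
  let s := (PySem.Str.replace seq "U" "T").toList
  match s with
  | [] => 0
  | c :: t => ((pvRleGo c 1 t).getLastD (c, 0)).2   -- runs[-1]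

-- ===== PRECONDITION & SPEC =====
def Spec_three_prime_self_run_py (seq : String) (out : Int) : Prop := out = three_prime_self_run_py_alt seq
instance (seq : String) (out : Int) : Decidable (Spec_three_prime_self_run_py seq out) := by unfold Spec_three_prime_self_run_py; infer_instance

-- ===== CLAIM (what is proved, stated in full; the proofs are below) =====
def Claim_equal_three_prime_self_run_py : Prop := ∀ (seq : String), Dom_three_prime_self_run_py seq → Spec_three_prime_self_run_py seq (three_prime_self_run_py seq)

-- ===== LEMMAS AND PROOFS =====

-- a run over an all-p prefix accumulates its whole length
theorem pvRunA_all_append (p : Char) (l r : List Char) :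
    (∀ x ∈ l, x = p) → ∀ a, pvRunA p a (l ++ r) = pvRunA p (a + l.length) r := by
  induction l with
  | nil => intro _ a; simp
  | cons x t ih =>
    intro h a
    have hx : x = p := h x (by simp)
    simp only [List.cons_append, pvRunA, if_pos hx]
    rw [ih (fun y hy => h y (by simp [hy])) (a + 1)]
    congr 1
    simp only [List.length_cons]
    push_cast
    ring

-- if every element equals p, the run is the whole list
theorem pvRunA_all (p : Char) (l : List Char) (h : ∀ x ∈ l, x = p) :
    pvRunA p 0 l = l.length := by
  have h2 := pvRunA_all_append p l [] h 0
  simpa [pvRunA] using h2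

-- once a mismatch occurs, anything appended after it is never reached
theorem pvRunA_append (p : Char) (l r : List Char) :
    (∃ x ∈ l, x ≠ p) → ∀ a, pvRunA p a (l ++ r) = pvRunA p a l := by
  induction l with
  | nil => rintro ⟨x, hx, -⟩; simp at hx
  | cons x t ih =>
    rintro ⟨y, hy, hyp⟩ a
    by_cases hx : x = p
    · have hyt : y ∈ t := by
        rcases List.mem_cons.mp hy with e | m
        · exact absurd (e.trans hx) hyp
        · exact m
      simp only [List.cons_append, pvRunA, if_pos hx]
      exact ih ⟨y, hyt, hyp⟩ (a + 1)
    · simp only [List.cons_append, pvRunA, if_neg hx]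

-- the trailing run of a nonempty list, exactly as port A computes it
def pvTrail (l : List Char) (h : l ≠ []) : Int := pvRunA (l.getLast h) 0 l.reverse

-- last element of an all-equal nonempty list
theorem getLast_of_all (d : Char) (t : List Char) (hall : ∀ x ∈ t, x = d) :
    (d :: t).getLast (by simp) = d := by
  have hm := List.getLast_mem (by simp : (d :: t : List Char) ≠ [])
  rcases List.mem_cons.mp hm with e | m
  · exact e
  · exact hall _ m

-- a nonempty list not all equal to its last element has a mismatch
theorem exists_ne_getLast (d : Char) (t : List Char) (hall : ¬ ∀ x ∈ t, x = d) :
    ∃ x ∈ (d :: t).reverse, x ≠ (d :: t).getLast (by simp) := by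
  obtain ⟨y, hy, hyd⟩ : ∃ y ∈ t, y ≠ d := by
    push_neg at hall; exact hall
  by_cases hp : (d :: t).getLast (by simp) = d
  · exact ⟨y, by simp [hy], by rw [hp]; exact hyd⟩
  · exact ⟨d, by simp, fun e => hp e.symm⟩

-- main characterisation of the last groupby group
theorem pvRleGo_getLast (l : List Char) : ∀ (c : Char) (n : Int) (d0 : Char × Int),
    (pvRleGo c n l).getLastD d0 =
      if ∀ x ∈ l, x = c then (c, n + l.length)
      else ((c :: l).getLast (by simp), pvTrail (c :: l) (by simp)) := by
  induction l with
  | nil => intro c n d0; simp [pvRleGo]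
  | cons d t ih =>
    intro c n d0
    by_cases hdc : d = c
    · subst hdc
      rw [show pvRleGo d n (d :: t) = pvRleGo d (n + 1) t by simp [pvRleGo]]
      rw [ih d (n + 1) d0]
      by_cases hall : ∀ x ∈ t, x = d
      · have hall2 : ∀ x ∈ d :: t, x = d :=
          fun x hx => (List.mem_cons.mp hx).elim id (hall x)
        rw [if_pos hall, if_pos hall2]
        refine Prod.ext rfl ?_
        show n + 1 + (t.length : Int) = n + ((d :: t).length : Int)
        simp only [List.length_cons]
        push_cast
        ring
      · have hall2 : ¬ ∀ x ∈ d :: t, x = d := fun h => hall (fun x hx => h x (by simp [hx]))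
        rw [if_neg hall, if_neg hall2]
        have hne : (d :: t) ≠ [] := by simp
        have hlast : (d :: d :: t).getLast (by simp) = (d :: t).getLast (by simp) := by
          simp [List.getLast_cons]
        refine Prod.ext hlast.symm ?_
        show pvTrail (d :: t) (by simp) = pvTrail (d :: d :: t) (by simp)
        unfold pvTrail
        rw [show (d :: d :: t).reverse = (d :: t).reverse ++ [d] by simp, hlast]
        rw [pvRunA_append _ _ _ (exists_ne_getLast d t hall) 0]
    · rw [show pvRleGo c n (d :: t) = (c, n) :: pvRleGo d 1 t by simp [pvRleGo, hdc]]
      rw [List.getLastD_cons, ih d 1 (c, n)]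
      have hallF : ¬ ∀ x ∈ d :: t, x = c := fun h => hdc (h d (by simp))
      rw [if_neg hallF]
      have hlast : (c :: d :: t).getLast (by simp) = (d :: t).getLast (by simp) := by
        simp [List.getLast_cons]
      by_cases hall : ∀ x ∈ t, x = d
      · rw [if_pos hall]
        have hlast2 : (d :: t).getLast (by simp) = d := getLast_of_all d t hall
        refine Prod.ext (by rw [hlast, hlast2]) ?_
        show (1 + (t.length : Int)) = pvTrail (c :: d :: t) (by simp)
        unfold pvTrail
        rw [show (c :: d :: t).reverse = (d :: t).reverse ++ [c] by simp, hlast, hlast2]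
        have hrev : ∀ x ∈ (d :: t).reverse, x = d := by
          intro x hx
          rcases List.mem_cons.mp (List.mem_reverse.mp hx) with e | m
          · exact e
          · exact hall x m
        rw [pvRunA_all_append d _ [c] hrev 0]
        have : pvRunA d ((0 : Int) + ((d :: t).reverse.length : Int)) [c] =
            (0 : Int) + ((d :: t).reverse.length : Int) := by
          have hcd : ¬ c = d := fun e => hdc e.symm
          simp [pvRunA, hcd]
        rw [this]
        simp
        ring
      · rw [if_neg hall]
        refine Prod.ext hlast.symm ?_
        show pvTrail (d :: t) (by simp) = pvTrail (c :: d :: t) (by simp)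
        unfold pvTrail
        rw [show (c :: d :: t).reverse = (d :: t).reverse ++ [c] by simp, hlast]
        rw [pvRunA_append _ _ _ (exists_ne_getLast d t hall) 0]

-- ===== VERDICT (by name: the statement is the Claim_ definition above) =====
theorem three_prime_self_run_py_spec : Claim_equal_three_prime_self_run_py := by
  unfold Claim_equal_three_prime_self_run_py
  intro seq _
  unfold Spec_three_prime_self_run_py three_prime_self_run_py three_prime_self_run_py_alt
  cases hs : (PySem.Str.replace seq "U" "T").toList with
  | nil => simp [hs]
  | cons c t =>
    simp only [hs]
    rw [dif_neg (by simp : (c :: t : List Char) ≠ [])]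
    rw [pvRleGo_getLast t c 1 (c, 0)]
    by_cases hall : ∀ x ∈ t, x = c
    · rw [if_pos hall]
      have hallc : ∀ x ∈ c :: t, x = c :=
        fun x hx => (List.mem_cons.mp hx).elim id (hall x)
      have hlast : (c :: t).getLast (by simp) = c := getLast_of_all c t hall
      rw [hlast]
      have hrev : ∀ x ∈ (c :: t).reverse, x = c := fun x hx => hallc _ (List.mem_reverse.mp hx)
      rw [pvRunA_all c _ hrev]
      simp
      ring
    · rw [if_neg hall]
      rfl
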